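-- pv_equiv track=rewrite | github.com/sb2bg/walrus | benchmarks/10_dict_operations.py | dict_benchmark
-- ===== SOURCE A (Python) =====
-- def dict_benchmark(n):
--     d = {}
--
--     # Insert n items
--     for i in range(n):
--         key = f"key_{i}"
--         d[key] = i * 2
--
--     # Look up all items
--     total = 0
--     for i in range(n):
--         key = f"key_{i}"
--         total += d[key]
--
--     return total
-- ===== SOURCE B (Python) =====
-- def dict_benchmark(n):
--     # The dict maps key_i -> i*2 and every key is looked up exactly once,
--     # so the result is sum(2*i for i in range(n)) = n*(n-1) (0 when n <= 0).
--     return n * (n - 1) if n > 0 else 0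
-- ===== Notes on version B (the rewrite author's own statement) =====
-- stated objective: faster
-- what changed: replaces the build-a-dict-then-look-everything-up double loop by the closed form n*(n-1) (0 for n <= 0)
import Mathlib
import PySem

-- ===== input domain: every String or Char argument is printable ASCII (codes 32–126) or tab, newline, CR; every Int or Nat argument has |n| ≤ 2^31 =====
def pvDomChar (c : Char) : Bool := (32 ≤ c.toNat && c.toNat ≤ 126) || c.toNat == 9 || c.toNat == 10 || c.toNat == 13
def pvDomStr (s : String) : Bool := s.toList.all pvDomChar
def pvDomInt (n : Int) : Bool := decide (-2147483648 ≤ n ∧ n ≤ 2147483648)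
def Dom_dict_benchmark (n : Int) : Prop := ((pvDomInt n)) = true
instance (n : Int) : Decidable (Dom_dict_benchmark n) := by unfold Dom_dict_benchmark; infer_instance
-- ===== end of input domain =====

-- B replaces A's build-a-dict-then-look-everything-up double loop by the closed form n*(n-1) (0 for n ≤ 0).

-- ===== PORT A =====
-- d[key] in the lookup loop is ported as getD … 0: every looked-up key was inserted by the
-- first loop over the same range, so the Python never raises KeyError and the default is dead.
def dict_benchmark (n : Int) : Int :=
  let d := (PySem.List.pyRange 0 n 1).foldl
    (fun d i => d.insert ("key_" ++ PySem.Int.toStr i) (i * 2)) PySem.Dict.empty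
  (PySem.List.pyRange 0 n 1).foldl
    (fun total i => total + d.getD ("key_" ++ PySem.Int.toStr i) 0) 0

-- ===== PORT B =====
def dict_benchmark_alt (n : Int) : Int :=
  if 0 < n then n * (n - 1) else 0

-- ===== PRECONDITION & SPEC =====
def Spec_dict_benchmark (n : Int) (out : Int) : Prop := out = dict_benchmark_alt n
instance (n : Int) (out : Int) : Decidable (Spec_dict_benchmark n out) := by unfold Spec_dict_benchmark; infer_instance

-- ===== CLAIM (what is proved, stated in full; the proofs are below) =====
def Claim_equal_dict_benchmark : Prop := ∀ (n : Int), Dom_dict_benchmark n → Spec_dict_benchmark n (dict_benchmark n)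

-- ===== LEMMAS AND PROOFS =====

-- str(n) for 0 ≤ n, written as structural recursion (msd-first digits of a Nat)
def pvRep (n : Nat) : List Char :=
  if h : n / 10 = 0 then [Nat.digitChar (n % 10)]
  else pvRep (n / 10) ++ [Nat.digitChar (n % 10)]
decreasing_by exact Nat.div_lt_self (Nat.pos_of_ne_zero (by omega)) (by omega)

def pvVal (cs : List Char) : Nat := cs.foldl (fun a c => a * 10 + (c.toNat - 48)) 0

lemma pvDigitChar_toNat (d : Nat) (h : d < 10) : (Nat.digitChar d).toNat = d + 48 := by
  interval_cases d <;> decide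

lemma pvVal_append (cs : List Char) (c : Char) :
    pvVal (cs ++ [c]) = pvVal cs * 10 + (c.toNat - 48) := by
  simp [pvVal, List.foldl_append]

lemma pvVal_rep (n : Nat) : pvVal (pvRep n) = n := by
  induction n using Nat.strong_induction_on with
  | _ n ih =>
    rw [pvRep]
    split
    · next h =>
      simp [pvVal, pvDigitChar_toNat (n % 10) (Nat.mod_lt _ (by omega))]
      omega
    · next h =>
      rw [pvVal_append, ih (n / 10) (Nat.div_lt_self (Nat.pos_of_ne_zero (by omega)) (by omega)),
          pvDigitChar_toNat (n % 10) (Nat.mod_lt _ (by omega))]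
      omega

lemma pvToDigitsCore_eq (fuel n : Nat) (ds : List Char) (h : n < fuel) :
    Nat.toDigitsCore 10 fuel n ds = pvRep n ++ ds := by
  induction fuel generalizing n ds with
  | zero => omega
  | succ fuel ih =>
    rw [Nat.toDigitsCore, pvRep]
    by_cases h0 : n / 10 = 0
    · simp [h0]
    · simp only [h0]
      rw [ih (n / 10) _ (by have := Nat.div_lt_self (Nat.pos_of_ne_zero (by omega)) (by norm_num : 1 < 10); omega)]
      simp

lemma pvToDigits_eq (n : Nat) : Nat.toDigits 10 n = pvRep n := by
  rw [Nat.toDigits, pvToDigitsCore_eq (n + 1) n [] (by omega)]; simp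

lemma pvToStr_inj_nonneg (i j : Int) (hi : 0 ≤ i) (hj : 0 ≤ j)
    (h : PySem.Int.toStr i = PySem.Int.toStr j) : i = j := by
  have hc : PySem.Int.toChars i = PySem.Int.toChars j := by
    have := congrArg String.toList h
    simpa [PySem.Int.toStr] using this
  simp only [PySem.Int.toChars, if_neg (by omega : ¬ i < 0), if_neg (by omega : ¬ j < 0)] at hc
  rw [pvToDigits_eq, pvToDigits_eq] at hc
  have := congrArg pvVal hc
  rw [pvVal_rep, pvVal_rep] at this
  omega

lemma pvKey_inj_nonneg (i j : Int) (hi : 0 ≤ i) (hj : 0 ≤ j)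
    (h : "key_" ++ PySem.Int.toStr i = "key_" ++ PySem.Int.toStr j) : i = j := by
  apply pvToStr_inj_nonneg i j hi hj
  have := congrArg String.toList h
  simp only [String.toList_append] at this
  exact String.ext (List.append_cancel_left this)

-- lookup in a dict built by a fold of inserts over keys injective on the list
lemma pvGetD_foldl_insert {α : Type} (kf : α → String) (vf : α → Int)
    (l : List α) (i : α)
    (hinj : ∀ a ∈ l, ∀ b ∈ l, kf a = kf b → a = b) (hi : i ∈ l) (d : PySem.Dict String Int) :
    (l.foldl (fun d x => d.insert (kf x) (vf x)) d).getD (kf i) 0 = vf i := by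
  induction l using List.reverseRecOn generalizing d with
  | nil => simp at hi
  | append_singleton l' x ih =>
    rw [List.foldl_append]
    simp only [List.foldl_cons, List.foldl_nil]
    rw [PySem.Dict.getD_insert]
    by_cases hk : kf i = kf x
    · have : i = x := hinj i hi x (by simp) hk
      simp [this]
    · rw [if_neg hk]
      have hil' : i ∈ l' := by
        rcases List.mem_append.mp hi with h' | h'
        · exact h'
        · exact absurd (by simp at h'; rw [h']) hk
      exact ih (fun a ha b hb => hinj a (by simp [ha]) b (by simp [hb])) hil' d

lemma pvSum_range (m : Nat) : ∀ t : Int,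
    (List.range m).foldl (fun (t : Int) (k : Nat) => t + (k : Int) * 2) t = t + (m : Int) * ((m : Int) - 1) := by
  induction m with
  | zero => intro t; simp
  | succ m ih =>
    intro t
    rw [List.range_succ, List.foldl_append, ih]
    simp only [List.foldl_cons, List.foldl_nil]
    push_cast
    ring

theorem pv_main (n : Int) : dict_benchmark n = dict_benchmark_alt n := by
  unfold dict_benchmark dict_benchmark_alt
  by_cases hn : 0 < n
  · rw [if_pos hn]
    have hcongr : (PySem.List.pyRange 0 n 1).foldl
        (fun total i => total + ((PySem.List.pyRange 0 n 1).foldl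
          (fun d i => d.insert ("key_" ++ PySem.Int.toStr i) (i * 2)) PySem.Dict.empty).getD
          ("key_" ++ PySem.Int.toStr i) 0) 0
        = (PySem.List.pyRange 0 n 1).foldl (fun total i => total + i * 2) 0 := by
      apply PySem.List.foldl_congr_mem
      intro acc x hx
      congr 1
      have hx' := (PySem.List.mem_pyRange_one).mp hx
      exact pvGetD_foldl_insert (fun i => "key_" ++ PySem.Int.toStr i) (fun i => i * 2)
        (PySem.List.pyRange 0 n 1) x
        (fun a ha b hb hab =>
          pvKey_inj_nonneg a b ((PySem.List.mem_pyRange_one).mp ha).1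
            ((PySem.List.mem_pyRange_one).mp hb).1 hab)
        hx PySem.Dict.empty
    rw [hcongr, PySem.List.pyRange_one]
    rw [List.foldl_map]
    have := pvSum_range (n - 0).toNat 0
    simp only [zero_add] at this ⊢
    rw [this]
    have : ((n - 0).toNat : Int) = n := by omega
    rw [this]
  · rw [if_neg hn]
    rw [PySem.List.pyRange_one_eq_nil (by omega)]
    simp

-- ===== VERDICT (by name: the statement is the Claim_ definition above) =====
theorem dict_benchmark_spec : Claim_equal_dict_benchmark := by
  intro n _
  unfold Spec_dict_benchmark
  exact pv_main n
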